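-- pv_equiv track=rewrite | github.com/world-federation-of-advertisers/planning-evaluation-framework | src/simulator/tests/halo_simulator_test.py | multivariate_hypergeometric
-- ===== SOURCE A (Python) =====
-- def multivariate_hypergeometric(colors, nsample):
--     samples = [0] * len(colors)
--     index = 0
--
--     while nsample:
--         if samples[index] < colors[index]:
--             samples[index] += 1
--             nsample -= 1
--         index = (index + 1) % len(samples)
--
--     return samples
-- ===== SOURCE B (Python) =====
-- def multivariate_hypergeometric(colors, nsample):
--     caps = [c if c > 0 else 0 for c in colors]
--     lo, hi = 0, max(caps, default=0)
--     while lo < hi: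
--         mid = (lo + hi + 1) // 2
--         if sum(min(c, mid) for c in caps) <= nsample:
--             lo = mid
--         else:
--             hi = mid - 1
--     r = nsample - sum(min(c, lo) for c in caps)
--     out = []
--     for c in caps:
--         v = min(c, lo)
--         if r > 0 and c > lo:
--             v += 1
--             r -= 1
--         out.append(v)
--     return out
-- ===== Notes on version B (the rewrite author's own statement) =====
-- stated objective: alternative
-- what changed: Replaces the one-increment-per-iteration round-robin loop by a water-fill: binary-search the common fill level L over the capped bins, then distribute the remainder one-each in index order in a single pass.
import Mathlib
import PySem

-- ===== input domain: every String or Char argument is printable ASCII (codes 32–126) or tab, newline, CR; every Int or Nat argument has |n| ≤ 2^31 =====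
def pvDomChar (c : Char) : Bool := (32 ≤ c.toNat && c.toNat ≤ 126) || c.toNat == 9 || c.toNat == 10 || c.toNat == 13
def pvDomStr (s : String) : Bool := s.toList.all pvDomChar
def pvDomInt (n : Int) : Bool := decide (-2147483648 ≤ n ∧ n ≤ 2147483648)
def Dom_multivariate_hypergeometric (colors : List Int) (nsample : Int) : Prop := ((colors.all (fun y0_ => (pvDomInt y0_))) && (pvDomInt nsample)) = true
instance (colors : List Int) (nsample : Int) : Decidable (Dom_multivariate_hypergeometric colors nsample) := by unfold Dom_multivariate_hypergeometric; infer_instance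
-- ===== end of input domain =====

-- B replaces A's one-increment-per-iteration round-robin loop by a water-fill:
-- binary-search the common fill level, then hand out the remainder one-each in
-- index order in a single pass (objective: alternative algorithm).

-- ===== PORT A =====
-- the while-loop of A; fuel only makes the recursion total (the Python loop
-- terminates exactly on the inputs admitted by Pre_ below, and the fuel chosen
-- in multivariate_hypergeometric is proven sufficient there)
def pvALoop (colors : List Int) : Nat → List Int → Int → Int → List Int
  | 0, s, _, _ => s
  | f+1, s, m, i =>
    if m ≠ 0 then
      match PySem.List.pyGet? s i, PySem.List.pyGet? colors i with
      | some si, some ci =>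
        if si < ci then
          let s' := PySem.List.pySetD s i (si + 1)
          pvALoop colors f s' (m - 1) (PySem.Int.mod (i + 1) s'.length)
        else
          pvALoop colors f s m (PySem.Int.mod (i + 1) s.length)
      | _, _ => s                     -- IndexError in Python (outside Pre_)
    else s

def multivariate_hypergeometric (colors : List Int) (nsample : Int) : List Int :=
  pvALoop colors ((nsample.toNat + 1) * (colors.length + 1))
    (List.replicate colors.length 0) nsample 0

-- ===== PORT B =====
-- 'c if c > 0 else 0' of Source B's comprehension
def pvCapf (c : Int) : Int := if 0 < c then c else 0

-- 'sum(min(c, L) for c in caps)'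
def pvSumMin (caps : List Int) (L : Int) : Int := (caps.map (fun c => min c L)).sum

-- the binary-search while-loop of Source B; fuel (hi-lo).toNat makes it total
def pvBS (caps : List Int) (m : Int) : Nat → Int → Int → Int
  | 0, lo, _ => lo
  | f+1, lo, hi =>
    if lo < hi then
      let mid := PySem.Int.floordiv (lo + hi + 1) 2
      if pvSumMin caps mid ≤ m then pvBS caps m f mid hi else pvBS caps m f lo (mid - 1)
    else lo

-- the final 'for c in caps' loop of Source B, carrying the remainder r
def pvFill (L : Int) : List Int → Int → List Int
  | [], _ => []
  | c :: cs, r =>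
    if 0 < r ∧ L < c then (min c L + 1) :: pvFill L cs (r - 1)
    else (min c L) :: pvFill L cs r

def multivariate_hypergeometric_alt (colors : List Int) (nsample : Int) : List Int :=
  let caps := colors.map pvCapf
  -- max(caps, default=0): every cap is ≥ 0, so the fold from 0 is Python's max
  let hi0 := caps.foldl max 0
  let L := pvBS caps nsample hi0.toNat 0 hi0
  pvFill L caps (nsample - pvSumMin caps L)

-- ===== PRECONDITION & SPEC =====
-- Pre_ = exactly the inputs where A's while-loop terminates and never indexes
-- out of range: 0 ≤ nsample ≤ total capped capacity (otherwise Python loops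
-- forever, or raises IndexError on empty colors with nsample ≠ 0).
def Pre_multivariate_hypergeometric (colors : List Int) (nsample : Int) : Prop :=
  0 ≤ nsample ∧ nsample ≤ (colors.map (fun c => max c 0)).sum

instance (colors : List Int) (nsample : Int) : Decidable (Pre_multivariate_hypergeometric colors nsample) := by
  unfold Pre_multivariate_hypergeometric; infer_instance

def pvWitness_multivariate_hypergeometric : List Int × Int := ([2, 1], 2)

def Spec_multivariate_hypergeometric (colors : List Int) (nsample : Int) (out : List Int) : Prop := out = multivariate_hypergeometric_alt colors nsample
instance (colors : List Int) (nsample : Int) (out : List Int) : Decidable (Spec_multivariate_hypergeometric colors nsample out) := by unfold Spec_multivariate_hypergeometric; infer_instance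

-- ===== CLAIM (what is proved, stated in full; the proofs are below) =====
def Claim_equal_multivariate_hypergeometric : Prop := ∀ (colors : List Int) (nsample : Int), Dom_multivariate_hypergeometric colors nsample → Pre_multivariate_hypergeometric colors nsample → Spec_multivariate_hypergeometric colors nsample (multivariate_hypergeometric colors nsample)

-- ===== LEMMAS AND PROOFS =====

-- one full pass of A's loop over the (sample, cap) pairs: increment while avail
def pvPass : List (Int × Int) → Int → List Int × Int
  | [], m => ([], m)
  | (s, c) :: rest, m =>
    if m ≠ 0 ∧ s < c then
      let p := pvPass rest (m - 1); ((s + 1) :: p.1, p.2)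
    else
      let p := pvPass rest m; (s :: p.1, p.2)

theorem pvALoop_zero (colors : List Int) (f : Nat) (s : List Int) (i : Int) :
    pvALoop colors f s 0 i = s := by
  cases f <;> simp [pvALoop]

theorem pvPass_zero (l : List (Int × Int)) : pvPass l 0 = (l.map Prod.fst, 0) := by
  induction l with
  | nil => simp [pvPass]
  | cons hd tl ih => obtain ⟨s, c⟩ := hd; simp [pvPass, ih]

theorem pvSet_append_cons (pre : List Int) (x y : Int) (rest : List Int) :
    (pre ++ x :: rest).set pre.length y = pre ++ y :: rest := by
  induction pre with
  | nil => simp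
  | cons p ps ih => simp [ih]

theorem pvPass_suffix (colors : List Int) :
    ∀ (rest pre : List Int) (f : Nat) (m : Int), 0 ≤ m →
    pre.length + rest.length = colors.length → rest ≠ [] →
    pvALoop colors (f + rest.length) (pre ++ rest) m (pre.length : Int)
      = pvALoop colors f
          (pre ++ (pvPass (rest.zip (colors.drop pre.length)) m).1)
          (pvPass (rest.zip (colors.drop pre.length)) m).2 0 := by
  intro rest
  induction rest with
  | nil => intro pre f m _ _ hne; exact absurd rfl hne
  | cons x rest' ihr =>
    intro pre f m hm hlen hne
    simp only [List.length_cons] at hlen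
    have hprelt : pre.length < colors.length := by omega
    have hpos : (0 : Int) < (colors.length : Int) := by omega
    obtain ⟨c, cs', hd⟩ := List.exists_cons_of_ne_nil
      (show colors.drop pre.length ≠ [] by
        intro h
        have := congrArg List.length h
        simp at this
        omega)
    have hcs' : colors.drop (pre.length + 1) = cs' := by
      rw [← List.tail_drop, hd, List.tail_cons]
    have hcs'len : cs'.length = rest'.length := by
      have := congrArg List.length hd
      simp at this
      omega
    have htk : (colors.take pre.length).length = pre.length := by
      simp [Nat.le_of_lt hprelt]
    have hget_colors : PySem.List.pyGet? colors (pre.length : Int) = some c := by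
      have h1 : PySem.List.pyGet?
          (colors.take pre.length ++ c :: cs') (((colors.take pre.length).length : Nat) : Int)
          = some c := PySem.List.pyGet?_append_length _ _ _
      rw [htk] at h1
      rwa [show colors.take pre.length ++ c :: cs' = colors from by
        rw [← hd, List.take_append_drop]] at h1
    have hget_s : PySem.List.pyGet? (pre ++ x :: rest') (pre.length : Int) = some x :=
      PySem.List.pyGet?_append_length _ _ _
    -- the continuation after the current index has been processed
    have step : ∀ (v : Int) (m2 : Int), 0 ≤ m2 →
        pvALoop colors (f + rest'.length) (pre ++ v :: rest') m2
            (PySem.Int.mod ((pre.length : Int) + 1) (colors.length : Int))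
          = pvALoop colors f
              (pre ++ v :: (pvPass (rest'.zip cs') m2).1)
              (pvPass (rest'.zip cs') m2).2 0 := by
      intro v m2 hm2
      rcases eq_or_ne rest' [] with hre | hre
      · subst hre
        simp only [List.length_nil] at hlen hcs'len
        simp only [List.zip_nil_left, pvPass, List.length_nil, Nat.add_zero]
        have hmod0 : PySem.Int.mod ((pre.length : Int) + 1) (colors.length : Int) = 0 := by
          rw [PySem.Int.mod_eq_emod_of_pos hpos,
            show ((pre.length : Int) + 1) = (colors.length : Int) from by omega,
            Int.emod_self]
        rw [hmod0]
      · have hrlen : rest'.length ≠ 0 := fun h => hre (List.eq_nil_of_length_eq_zero h)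
        have hmod : PySem.Int.mod ((pre.length : Int) + 1) (colors.length : Int)
            = (pre.length : Int) + 1 := by
          rw [PySem.Int.mod_eq_emod_of_pos hpos]
          exact Int.emod_eq_of_lt (by positivity) (by omega)
        rw [hmod]
        have hIH := ihr (pre ++ [v]) f m2 hm2 (by simp; omega) hre
        simp only [List.append_assoc, List.singleton_append, List.length_append,
          List.length_cons, List.length_nil] at hIH
        push_cast at hIH
        rw [hcs'] at hIH
        exact hIH
    simp only [List.length_cons]
    show pvALoop colors ((f + rest'.length) + 1) (pre ++ x :: rest') m (pre.length : Int) = _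
    simp only [pvALoop]
    by_cases hm0 : m = 0
    · subst hm0
      rw [if_neg (by simp)]
      simp only [pvPass_zero, pvALoop_zero]
      rw [List.map_fst_zip (by simp only [List.length_drop, List.length_cons]; omega)]
    · rw [if_pos hm0, hget_s, hget_colors]
      simp only []
      by_cases hxc : x < c
      · rw [if_pos hxc]
        have hset : PySem.List.pySetD (pre ++ x :: rest') (pre.length : Int) (x + 1)
            = pre ++ (x + 1) :: rest' := by
          rw [PySem.List.pySetD_natCast, pvSet_append_cons]
        rw [hset]
        have hslen : ((pre ++ (x + 1) :: rest').length : Int) = (colors.length : Int) := by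
          simp only [List.length_append, List.length_cons]
          omega
        rw [hslen]
        have hpass : pvPass ((x :: rest').zip (colors.drop pre.length)) m
            = ((x + 1) :: (pvPass (rest'.zip cs') (m - 1)).1,
               (pvPass (rest'.zip cs') (m - 1)).2) := by
          rw [hd, List.zip_cons_cons]
          simp only [pvPass, if_pos (And.intro hm0 hxc)]
        rw [hpass]
        exact step (x + 1) (m - 1) (by omega)
      · rw [if_neg hxc]
        have hslen : ((pre ++ x :: rest').length : Int) = (colors.length : Int) := by
          simp only [List.length_append, List.length_cons]
          omega
        rw [hslen]
        have hpass : pvPass ((x :: rest').zip (colors.drop pre.length)) m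
            = (x :: (pvPass (rest'.zip cs') m).1, (pvPass (rest'.zip cs') m).2) := by
          rw [hd, List.zip_cons_cons]
          simp only [pvPass, if_neg (fun h : m ≠ 0 ∧ x < c => hxc h.2)]
        rw [hpass]
        exact step x m hm

theorem pvPass_all (colors : List Int) (s : List Int) (f : Nat) (m : Int)
    (hm : 0 ≤ m) (hlen : s.length = colors.length) (hne : colors ≠ []) :
    pvALoop colors (f + colors.length) s m 0
      = pvALoop colors f (pvPass (s.zip colors) m).1 (pvPass (s.zip colors) m).2 0 := by
  have hsne : s ≠ [] := by
    intro h; subst h; simp at hlen; exact hne (List.eq_nil_of_length_eq_zero hlen.symm)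
  have := pvPass_suffix colors s [] f m hm (by simpa using hlen.symm ▸ rfl) hsne
  simpa [hlen] using this

theorem pvCapf_nonneg (c : Int) : 0 ≤ pvCapf c := by unfold pvCapf; split <;> omega

-- number of bins still available at level ℓ
def pvK (caps : List Int) (ℓ : Int) : Nat := caps.countP (fun c => decide (ℓ < c))

theorem pvOP (ℓ : Int) (hℓ : 0 ≤ ℓ) :
    ∀ (colors : List Int) (m : Int), 0 ≤ m →
    pvPass (((colors.map pvCapf).map (fun c => min c ℓ)).zip colors) m
      = (pvFill ℓ (colors.map pvCapf) m,
         m - min m (pvK (colors.map pvCapf) ℓ)) := by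
  intro colors
  induction colors with
  | nil =>
    intro m hm
    simp only [List.map_nil, List.zip_nil_left, pvPass, pvFill, pvK, List.countP_nil,
      Nat.cast_zero]
    refine Prod.ext rfl ?_
    simp only; omega
  | cons c cs ih =>
    intro m hm
    have hcap := pvCapf_nonneg c
    simp only [List.map_cons, List.zip_cons_cons, pvPass]
    have hKcons : (pvK (pvCapf c :: cs.map pvCapf) ℓ : Int)
        = (if ℓ < pvCapf c then 1 else 0) + (pvK (cs.map pvCapf) ℓ : Int) := by
      simp only [pvK, List.countP_cons]
      by_cases h : ℓ < pvCapf c <;> simp [h] <;> try omega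
    by_cases hc : 0 < m ∧ ℓ < pvCapf c
    · have hcond : m ≠ 0 ∧ min (pvCapf c) ℓ < c := by
        refine ⟨by omega, ?_⟩
        have := hc.2; unfold pvCapf at this ⊢; split_ifs at this ⊢ <;> omega
      rw [if_pos hcond, ih (m - 1) (by omega)]
      simp only [pvFill, if_pos hc]
      refine Prod.ext rfl ?_
      simp only
      rw [hKcons, if_pos hc.2]
      omega
    · have hncond : ¬(m ≠ 0 ∧ min (pvCapf c) ℓ < c) := by
        intro hh
        apply hc
        refine ⟨by omega, ?_⟩
        have := hh.2; unfold pvCapf at this ⊢; split_ifs at this ⊢ <;> omega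
      rw [if_neg hncond, ih m hm]
      simp only [pvFill, if_neg hc]
      refine Prod.ext rfl ?_
      simp only
      rw [hKcons]
      by_cases h2 : ℓ < pvCapf c
      · rw [if_pos h2]
        have hm0 : m = 0 := by
          by_contra hm0; exact hc ⟨by omega, h2⟩
        subst hm0
        have hk0 : (0 : Int) ≤ (pvK (cs.map pvCapf) ℓ : Int) := by positivity
        omega
      · rw [if_neg h2]; omega

theorem pvFill_zero (L : Int) (caps : List Int) :
    pvFill L caps 0 = caps.map (fun c => min c L) := by
  induction caps with
  | nil => simp [pvFill]
  | cons c cs ih => simp [pvFill, ih]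

theorem pvFill_full (ℓ : Int) : ∀ (caps : List Int) (r : Int),
    (pvK caps ℓ : Int) ≤ r → pvFill ℓ caps r = caps.map (fun c => min c (ℓ + 1)) := by
  intro caps
  induction caps with
  | nil => intro r _; simp [pvFill]
  | cons c cs ih =>
    intro r hr
    simp only [pvK, List.countP_cons] at hr
    have hk0 : (0 : Int) ≤ (pvK cs ℓ : Int) := by positivity
    by_cases h : ℓ < c
    · simp only [h, decide_true, if_true] at hr
      push_cast at hr
      have hcond : 0 < r ∧ ℓ < c := by constructor <;> [omega; exact h]
      have := ih (r - 1) (by simp only [pvK]; omega)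
      simp only [pvFill, if_pos hcond, this, List.map_cons, List.cons.injEq]
      exact ⟨by omega, trivial⟩
    · simp only [h, decide_false] at hr
      have hncond : ¬(0 < r ∧ ℓ < c) := fun hh => h hh.2
      have := ih r (by simp only [pvK]; omega)
      simp only [pvFill, if_neg hncond, this, List.map_cons, List.cons.injEq]
      exact ⟨by omega, trivial⟩

theorem pvSumMin_mono (caps : List Int) (a b : Int) (h : a ≤ b) :
    pvSumMin caps a ≤ pvSumMin caps b := by
  induction caps with
  | nil => simp [pvSumMin]
  | cons c cs ih => simp only [pvSumMin, List.map_cons, List.sum_cons] at *; omega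

theorem pvSumMin_step (caps : List Int) (ℓ : Int) :
    pvSumMin caps (ℓ + 1) = pvSumMin caps ℓ + (pvK caps ℓ : Int) := by
  induction caps with
  | nil => simp [pvSumMin, pvK]
  | cons c cs ih =>
    simp only [pvSumMin, pvK, List.map_cons, List.sum_cons, List.countP_cons] at *
    by_cases h : ℓ < c
    · simp only [h, decide_true, if_true]; push_cast; omega
    · simp only [h, decide_false]; push_cast; omega

theorem pvSumMin_all (caps : List Int) (ℓ : Int) (h : ∀ c ∈ caps, c ≤ ℓ) :
    pvSumMin caps ℓ = caps.sum := by
  induction caps with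
  | nil => simp [pvSumMin]
  | cons c cs ih =>
    have h1 := h c (by simp)
    have := ih (fun x hx => h x (by simp [hx]))
    simp only [pvSumMin, List.map_cons, List.sum_cons] at *; omega

theorem pvK_zero_all (caps : List Int) (ℓ : Int) (h : pvK caps ℓ = 0) :
    ∀ c ∈ caps, c ≤ ℓ := by
  intro c hc
  have := List.countP_eq_zero.mp h c hc
  simpa using this

theorem pvMap_eq_of_sum_eq (a b : Int) (hab : a ≤ b) : ∀ (caps : List Int),
    pvSumMin caps a = pvSumMin caps b →
    caps.map (fun c => min c a) = caps.map (fun c => min c b) := by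
  intro caps
  induction caps with
  | nil => simp
  | cons c cs ih =>
    intro h
    have htail := pvSumMin_mono cs a b hab
    simp only [pvSumMin, List.map_cons, List.sum_cons] at h ⊢ htail
    have hhead : min c a = min c b := by omega
    have hsum : pvSumMin cs a = pvSumMin cs b := by
      simp only [pvSumMin]; omega
    rw [hhead, ih hsum]

theorem pvCaps_min_zero (colors : List Int) :
    (colors.map pvCapf).map (fun c => min c 0) = List.replicate colors.length 0 := by
  induction colors with
  | nil => simp
  | cons c cs ih =>
    have := pvCapf_nonneg c
    simp only [List.map_cons, List.length_cons, List.replicate_succ, List.cons.injEq]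
    exact ⟨by omega, ih⟩

theorem pvSumMin_zero (colors : List Int) : pvSumMin (colors.map pvCapf) 0 = 0 := by
  induction colors with
  | nil => simp [pvSumMin]
  | cons c cs ih =>
    have := pvCapf_nonneg c
    simp only [pvSumMin, List.map_cons, List.sum_cons] at *; omega

theorem pvCaps_eq_max (colors : List Int) :
    colors.map (fun c => max c 0) = colors.map pvCapf := by
  apply List.map_congr_left; intro c _; unfold pvCapf; omega

theorem pvLe_foldl_max : ∀ (l : List Int) (i : Int), i ≤ l.foldl max i := by
  intro l
  induction l with
  | nil => simp
  | cons c cs ih => intro i; have := ih (max i c); simp only [List.foldl_cons]; omega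

theorem pvMem_le_foldl_max : ∀ (l : List Int) (i : Int) (c : Int), c ∈ l → c ≤ l.foldl max i := by
  intro l
  induction l with
  | nil => simp
  | cons x xs ih =>
    intro i c hc
    simp only [List.mem_cons] at hc
    rcases hc with rfl | hc
    · have := pvLe_foldl_max xs (max i c); simp only [List.foldl_cons]; omega
    · exact ih (max i x) c hc

theorem pvBS_spec (caps : List Int) (t H : Int) :
    ∀ (fuel : Nat) (lo hi : Int), 0 ≤ lo → lo ≤ hi → pvSumMin caps lo ≤ t →
    (hi = H ∨ t < pvSumMin caps (hi + 1)) → (hi - lo).toNat ≤ fuel →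
    0 ≤ pvBS caps t fuel lo hi ∧ pvSumMin caps (pvBS caps t fuel lo hi) ≤ t ∧
      (t < pvSumMin caps (pvBS caps t fuel lo hi + 1) ∨ pvBS caps t fuel lo hi = H) := by
  intro fuel
  induction fuel with
  | zero =>
    intro lo hi h0 hlh hs hhi hf
    have heq : lo = hi := by omega
    subst heq
    exact ⟨h0, hs, hhi.symm⟩
  | succ f ihf =>
    intro lo hi h0 hlh hs hhi hf
    simp only [pvBS]
    by_cases hlt : lo < hi
    · rw [if_pos hlt]
      have h2 : PySem.Int.floordiv (lo + hi + 1) 2 = (lo + hi + 1) / 2 :=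
        PySem.Int.floordiv_eq_ediv_of_pos (by omega)
      have hb : lo < PySem.Int.floordiv (lo + hi + 1) 2 ∧
          PySem.Int.floordiv (lo + hi + 1) 2 ≤ hi := by rw [h2]; omega
      by_cases hsm : pvSumMin caps (PySem.Int.floordiv (lo + hi + 1) 2) ≤ t
      · rw [if_pos hsm]
        exact ihf (PySem.Int.floordiv (lo + hi + 1) 2) hi (by omega) (by omega) hsm hhi (by omega)
      · rw [if_neg hsm]
        refine ihf lo (PySem.Int.floordiv (lo + hi + 1) 2 - 1) h0 (by omega) hs (Or.inr ?_) (by omega)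
        rw [sub_add_cancel]
        omega
    · rw [if_neg hlt]
      have heq : lo = hi := by omega
      subst heq
      exact ⟨h0, hs, hhi.symm⟩

theorem pvMain (colors : List Int) (L t : Int)
    (hL0 : 0 ≤ L) (hSL : pvSumMin (colors.map pvCapf) L ≤ t)
    (htop : t ≤ (colors.map pvCapf).sum)
    (hnext : t < pvSumMin (colors.map pvCapf) (L + 1) ∨ ∀ c ∈ colors.map pvCapf, c ≤ L) :
    ∀ (M : Nat) (ℓ : Int) (f : Nat), 0 ≤ ℓ → ℓ ≤ L →
    pvSumMin (colors.map pvCapf) ℓ + (M : Int) = t →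
    pvALoop colors (f + M * colors.length)
        ((colors.map pvCapf).map (fun c => min c ℓ)) (M : Int) 0
      = pvFill L (colors.map pvCapf) (t - pvSumMin (colors.map pvCapf) L) := by
  intro M
  induction M using Nat.strong_induction_on with
  | _ M ih =>
    intro ℓ f hℓ0 hℓL hsum
    match M, ih with
    | 0, _ =>
      simp only [Nat.cast_zero, Nat.zero_mul, Nat.add_zero] at hsum ⊢
      rw [pvALoop_zero]
      have hmono := pvSumMin_mono (colors.map pvCapf) ℓ L hℓL
      have hr0 : t - pvSumMin (colors.map pvCapf) L = 0 := by omega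
      rw [hr0, pvFill_zero]
      exact pvMap_eq_of_sum_eq ℓ L hℓL (colors.map pvCapf) (by omega)
    | M' + 1, ih =>
      have hne : colors ≠ [] := by
        intro h
        subst h
        simp only [List.map_nil, pvSumMin, List.sum_nil, List.map_nil] at hsum htop
        omega
      have hfu : f + (M' + 1) * colors.length
          = (f + M' * colors.length) + colors.length := by
        rw [Nat.succ_mul]; omega
      rw [hfu, pvPass_all colors _ (f + M' * colors.length) ((M' + 1 : Nat) : Int)
        (by positivity) (by simp) hne]
      rw [pvOP ℓ hℓ0 colors ((M' + 1 : Nat) : Int) (by positivity)]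
      by_cases hck : ((M' + 1 : Nat) : Int) < (pvK (colors.map pvCapf) ℓ : Int)
      · have hm2 : ((M' + 1 : Nat) : Int) - min ((M' + 1 : Nat) : Int) (pvK (colors.map pvCapf) ℓ : Int) = 0 := by
          omega
        simp only [hm2, pvALoop_zero]
        have hℓL' : ℓ = L := by
          by_contra hne2
          have hstep := pvSumMin_step (colors.map pvCapf) ℓ
          have hmono := pvSumMin_mono (colors.map pvCapf) (ℓ + 1) L (by omega)
          omega
        subst hℓL'
        have : ((M' + 1 : Nat) : Int) = t - pvSumMin (colors.map pvCapf) ℓ := by omega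
        rw [this]
      · have hk1 : 1 ≤ (pvK (colors.map pvCapf) ℓ : Int) := by
          by_contra hk0
          have hz : pvK (colors.map pvCapf) ℓ = 0 := by omega
          have := pvSumMin_all (colors.map pvCapf) ℓ (pvK_zero_all _ _ hz)
          push_cast at hsum
          omega
        have hfull := pvFill_full ℓ (colors.map pvCapf) ((M' + 1 : Nat) : Int) (by omega)
        simp only [hfull]
        have hstep := pvSumMin_step (colors.map pvCapf) ℓ
        have hℓ1L : ℓ + 1 ≤ L := by
          by_contra hL
          have hℓeq : ℓ = L := by omega
          subst hℓeq
          rcases hnext with h | h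
          · omega
          · have hz : pvK (colors.map pvCapf) ℓ = 0 := by
              apply List.countP_eq_zero.mpr
              intro c hc
              simpa using not_lt.mpr (h c hc)
            omega
        have hKle : pvK (colors.map pvCapf) ℓ ≤ M' + 1 := by omega
        have hKle' : pvK (colors.map pvCapf) ℓ - 1 ≤ M' := by omega
        have hM2lt : M' + 1 - pvK (colors.map pvCapf) ℓ < M' + 1 := by omega
        have hM2le : M' + 1 - pvK (colors.map pvCapf) ℓ ≤ M' := by omega
        have hcast : ((M' + 1 : Nat) : Int) - min ((M' + 1 : Nat) : Int) (pvK (colors.map pvCapf) ℓ : Int)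
            = ((M' + 1 - pvK (colors.map pvCapf) ℓ : Nat) : Int) := by
          push_cast [hKle]
          omega
        rw [hcast]
        have hfu2 : f + M' * colors.length
            = (f + (M' - (M' + 1 - pvK (colors.map pvCapf) ℓ)) * colors.length)
              + (M' + 1 - pvK (colors.map pvCapf) ℓ) * colors.length := by
          rw [Nat.add_assoc, ← Nat.add_mul, Nat.sub_add_cancel hM2le]
        rw [hfu2]
        exact ih (M' + 1 - pvK (colors.map pvCapf) ℓ) hM2lt (ℓ + 1)
          (f + (M' - (M' + 1 - pvK (colors.map pvCapf) ℓ)) * colors.length)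
          (by omega) hℓ1L (by push_cast [hKle]; omega)

-- ===== VERDICT (by name: the statement is the Claim_ definition above) =====
theorem multivariate_hypergeometric_spec : Claim_equal_multivariate_hypergeometric := by
  intro colors nsample _ hpre
  obtain ⟨h0, hle⟩ := hpre
  unfold Spec_multivariate_hypergeometric multivariate_hypergeometric
    multivariate_hypergeometric_alt
  simp only []
  have hsum0 := pvSumMin_zero colors
  have hhi0 : (0 : Int) ≤ (colors.map pvCapf).foldl max 0 := pvLe_foldl_max _ 0
  obtain ⟨hL0, hSL, hdisj⟩ := pvBS_spec (colors.map pvCapf) nsample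
    ((colors.map pvCapf).foldl max 0) (((colors.map pvCapf).foldl max 0).toNat)
    0 ((colors.map pvCapf).foldl max 0) le_rfl hhi0 (by rw [hsum0]; exact h0)
    (Or.inl rfl) (by omega)
  have htop : nsample ≤ (colors.map pvCapf).sum := by
    rw [← pvCaps_eq_max]; exact hle
  have hnext : nsample < pvSumMin (colors.map pvCapf)
        (pvBS (colors.map pvCapf) nsample (((colors.map pvCapf).foldl max 0).toNat)
          0 ((colors.map pvCapf).foldl max 0) + 1)
      ∨ ∀ c ∈ colors.map pvCapf,
          c ≤ pvBS (colors.map pvCapf) nsample (((colors.map pvCapf).foldl max 0).toNat)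
            0 ((colors.map pvCapf).foldl max 0) := by
    rcases hdisj with h | h
    · exact Or.inl h
    · refine Or.inr (fun c hc => ?_)
      rw [h]
      exact pvMem_le_foldl_max _ 0 c hc
  have hmulle : nsample.toNat * colors.length
      ≤ (nsample.toNat + 1) * (colors.length + 1) :=
    Nat.mul_le_mul (Nat.le_succ _) (Nat.le_succ _)
  have hfuel : (nsample.toNat + 1) * (colors.length + 1)
      = ((nsample.toNat + 1) * (colors.length + 1) - nsample.toNat * colors.length)
        + nsample.toNat * colors.length := by omega
  have hmain := pvMain colors
    (pvBS (colors.map pvCapf) nsample (((colors.map pvCapf).foldl max 0).toNat)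
      0 ((colors.map pvCapf).foldl max 0)) nsample hL0 hSL htop hnext
    nsample.toNat 0
    ((nsample.toNat + 1) * (colors.length + 1) - nsample.toNat * colors.length)
    le_rfl hL0 (by rw [hsum0]; omega)
  have hns : ((nsample.toNat : Nat) : Int) = nsample := by omega
  rw [hns] at hmain
  rw [hfuel, ← pvCaps_min_zero colors]
  exact hmain
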